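-- pv_equiv track=rewrite | github.com/Teachable-AI-Lab/val | val/env_interfaces/dice_adventure/dice_adventure_env.py | get_x_y_cursor
-- ===== SOURCE A (Python) =====
-- def get_x_y_cursor(x, y, action_plan):
--     for action in action_plan:
--         action = action.lower()
--         if action == "up":
--             y += 1
--         elif action == "down":
--             y -= 1
--         elif action == "left":
--             x -= 1
--         elif action == "right":
--             x += 1
--         elif action == "wait":
--             pass
--     return x, y
-- ===== SOURCE B (Python) =====
-- def get_x_y_cursor(x, y, action_plan):
--     lowered = [a.lower() for a in action_plan]
--     return (x + lowered.count("right") - lowered.count("left"),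
--             y + lowered.count("up") - lowered.count("down"))
-- ===== Notes on version B (the rewrite author's own statement) =====
-- stated objective: idiomatic
-- what changed: Replaces the running-coordinate branch-and-update loop with counting each direction in the lowercased plan and combining the four counts in one closed-form arithmetic step.
import Mathlib
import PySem

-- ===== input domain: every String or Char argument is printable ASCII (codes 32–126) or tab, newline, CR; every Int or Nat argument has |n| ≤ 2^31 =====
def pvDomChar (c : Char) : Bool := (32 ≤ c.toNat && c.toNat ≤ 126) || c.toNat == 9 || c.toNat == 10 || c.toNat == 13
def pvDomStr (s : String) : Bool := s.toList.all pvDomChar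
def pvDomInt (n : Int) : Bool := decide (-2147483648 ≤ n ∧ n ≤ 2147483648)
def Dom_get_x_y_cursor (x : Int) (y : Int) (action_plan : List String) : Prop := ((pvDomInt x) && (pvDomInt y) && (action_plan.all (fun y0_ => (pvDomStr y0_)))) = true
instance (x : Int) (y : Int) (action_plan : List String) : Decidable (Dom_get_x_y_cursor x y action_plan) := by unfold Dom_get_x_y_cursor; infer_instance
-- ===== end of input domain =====

-- B replaces the per-action branch-and-update loop with counting each lowercased
-- direction once and combining the four counts arithmetically (idiomatic, same cost).
-- ===== PORT A =====
def get_x_y_cursor (x : Int) (y : Int) (action_plan : List String) : Int × Int :=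
  let st := action_plan.foldl (fun (st : Int × Int) action =>
    let action := PySem.Str.lower action
    if action = "up" then (st.1, st.2 + 1)
    else if action = "down" then (st.1, st.2 - 1)
    else if action = "left" then (st.1 - 1, st.2)
    else if action = "right" then (st.1 + 1, st.2)
    else if action = "wait" then st
    else st) (x, y)
  (st.1, st.2)

-- ===== PORT B =====
def get_x_y_cursor_alt (x : Int) (y : Int) (action_plan : List String) : Int × Int :=
  let lowered := action_plan.map PySem.Str.lower
  (x + (PySem.List.count lowered "right" : Int) - (PySem.List.count lowered "left" : Int),
   y + (PySem.List.count lowered "up" : Int) - (PySem.List.count lowered "down" : Int))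

-- ===== PRECONDITION & SPEC =====
def Spec_get_x_y_cursor (x : Int) (y : Int) (action_plan : List String) (out : Int × Int) : Prop := out = get_x_y_cursor_alt x y action_plan
instance (x : Int) (y : Int) (action_plan : List String) (out : Int × Int) : Decidable (Spec_get_x_y_cursor x y action_plan out) := by unfold Spec_get_x_y_cursor; infer_instance

-- ===== CLAIM (what is proved, stated in full; the proofs are below) =====
def Claim_equal_get_x_y_cursor : Prop := ∀ (x : Int) (y : Int) (action_plan : List String), Dom_get_x_y_cursor x y action_plan → Spec_get_x_y_cursor x y action_plan (get_x_y_cursor x y action_plan)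

-- ===== LEMMAS AND PROOFS =====

-- ===== VERDICT (by name: the statement is the Claim_ definition above) =====
lemma cursor_eq (x y : Int) (l : List String) :
    get_x_y_cursor x y l = get_x_y_cursor_alt x y l := by
  induction l generalizing x y with
  | nil => simp [get_x_y_cursor, get_x_y_cursor_alt, PySem.List.count]
  | cons a t ih =>
    have h := ih
    simp only [get_x_y_cursor, get_x_y_cursor_alt, List.foldl_cons, List.map_cons,
      PySem.List.count, List.count_cons] at h ⊢
    by_cases h1 : PySem.Str.lower a = "up" <;>
    by_cases h2 : PySem.Str.lower a = "down" <;>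
    by_cases h3 : PySem.Str.lower a = "left" <;>
    by_cases h4 : PySem.Str.lower a = "right" <;>
    by_cases h5 : PySem.Str.lower a = "wait" <;>
      simp_all <;> ring_nf

theorem get_x_y_cursor_spec : Claim_equal_get_x_y_cursor := by
  intro x y l _
  unfold Spec_get_x_y_cursor
  exact cursor_eq x y l
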